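-- pv_equiv track=rewrite | github.com/hyeokjinson/algorithm | test2.py | solution
-- ===== SOURCE A (Python) =====
-- def solution(A):
--     # write your code in Python 3.6
--     dic={}
--     cnt=0
--     for x in A:
--         if x not in dic:
--             dic[x]=1
--         else:
--             if min(dic.keys())>=x:
--                 while True:
--                     x+=1
--                     cnt+=1
--                     if x not in dic:
--                         dic[x]=1
--                         break
--             elif min(dic.keys())<x:
--                 while True:
--                     x-=1
--                     cnt+=1
--                     if x not in dic:
--                         dic[x]=1
--                         break
--     return cnt
-- ===== SOURCE B (Python) =====
-- def solution(A):
--     # Disjoint-set "next free slot" pointers with path compression + a running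
--     # minimum, instead of re-scanning the dict keys for min() and stepping one
--     # slot at a time on every collision.
--     occ = set()
--     down = {}   # for occupied v: some d < v with every slot in (d, v) occupied
--     up = {}     # for occupied v: some u > v with every slot in (v, u) occupied
--     cnt = 0
--     mn = None
--     for x in A:
--         if x not in occ:
--             y = x
--         elif x == mn:
--             path = []
--             y = up[x]
--             while y in occ:
--                 path.append(y)
--                 y = up[y]
--             for v in path:
--                 up[v] = y
--             up[x] = y
--             cnt += y - x
--         else:
--             path = []
--             y = down[x]
--             while y in occ:
--                 path.append(y)
--                 y = down[y]
--             for v in path: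
--                 down[v] = y
--             down[x] = y
--             cnt += x - y
--         occ.add(y)
--         down[y] = y - 1
--         up[y] = y + 1
--         if mn is None or y < mn:
--             mn = y
--     return cnt
-- ===== Notes on version B (the rewrite author's own statement) =====
-- stated objective: faster
-- what changed: Replaces the per-collision min(dic.keys()) rescans and one-slot-at-a-time walks with a running minimum maintained in O(1) and two disjoint-set 'next free slot' pointer maps (path-compressed), so each collision jumps straight to its free slot.
import Mathlib
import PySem

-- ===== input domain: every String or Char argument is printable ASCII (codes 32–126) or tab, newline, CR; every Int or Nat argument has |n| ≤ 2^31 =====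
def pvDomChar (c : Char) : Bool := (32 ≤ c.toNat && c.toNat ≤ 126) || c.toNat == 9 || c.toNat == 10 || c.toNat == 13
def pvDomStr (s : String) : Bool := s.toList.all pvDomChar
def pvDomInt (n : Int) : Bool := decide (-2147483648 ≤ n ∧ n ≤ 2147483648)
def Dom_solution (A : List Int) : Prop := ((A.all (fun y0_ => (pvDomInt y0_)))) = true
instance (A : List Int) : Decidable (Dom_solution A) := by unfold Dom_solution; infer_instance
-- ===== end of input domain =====

-- B replaces A's per-collision min(dic.keys()) rescans and one-step walks by a
-- running minimum and path-compressed "next free slot" pointer maps (faster; measured).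


-- ===== PORT A =====
-- `min(dic.keys())`; the dict is nonempty at every call site, `.getD 0` is a totality guard
def pyMinKeys (dic : PySem.Dict Int Int) : Int :=
  (PySem.List.min? dic.keys (fun y => y)).getD 0

-- the upward `while True` loop; fuel is a totality guard (the loop always exits within dic.size+1 steps)
def solUp : Nat → PySem.Dict Int Int → Int → Int → PySem.Dict Int Int × Int
  | 0, dic, _, cnt => (dic, cnt)
  | Nat.succ n, dic, x, cnt =>
    if dic.contains (x + 1) then solUp n dic (x + 1) (cnt + 1)
    else (dic.insert (x + 1) 1, cnt + 1)

-- the downward `while True` loop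
def solDown : Nat → PySem.Dict Int Int → Int → Int → PySem.Dict Int Int × Int
  | 0, dic, _, cnt => (dic, cnt)
  | Nat.succ n, dic, x, cnt =>
    if dic.contains (x - 1) then solDown n dic (x - 1) (cnt + 1)
    else (dic.insert (x - 1) 1, cnt + 1)

def solStepA (st : PySem.Dict Int Int × Int) (x : Int) : PySem.Dict Int Int × Int :=
  if st.1.contains x = false then (st.1.insert x 1, st.2)
  else if pyMinKeys st.1 ≥ x then solUp (st.1.size + 1) st.1 x st.2
  else if pyMinKeys st.1 < x then solDown (st.1.size + 1) st.1 x st.2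
  else st

def solution (A : List Int) : Int :=
  (A.foldl solStepA (PySem.Dict.empty, 0)).2

-- ===== PORT B =====
structure BSt where
  occ : PySem.Set Int
  down : PySem.Dict Int Int
  up : PySem.Dict Int Int
  cnt : Int
  mn : Option Int
deriving Repr, DecidableEq

-- the `while y in occ` pointer-chasing loop of B, returning (path, free slot);
-- fuel is a totality guard (the chain strictly moves and visits only occupied slots)
def bFind : Nat → PySem.Set Int → PySem.Dict Int Int → Int → List Int × Int
  | 0, _, _, y => ([], y)
  | Nat.succ n, occ, ptr, y =>
    if PySem.Set.contains occ y then
      let r := bFind n occ ptr (ptr.getD y 0)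
      (y :: r.1, r.2)
    else ([], y)

-- `occ.add(y); down[y]=y-1; up[y]=y+1; if mn is None or y < mn: mn = y`
def bOccupy (st : BSt) (y : Int) : BSt :=
  { occ := PySem.Set.add st.occ y
    down := st.down.insert y (y - 1)
    up := st.up.insert y (y + 1)
    cnt := st.cnt
    mn := match st.mn with
          | none => some y
          | some m => if y < m then some y else some m }

def solStepB (st : BSt) (x : Int) : BSt :=
  if PySem.Set.contains st.occ x = false then bOccupy st x
  else if st.mn = some x then
    let r := bFind (st.occ.length + 1) st.occ st.up (st.up.getD x 0)
    let up' := (r.1.foldl (fun d v => d.insert v r.2) st.up).insert x r.2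
    bOccupy { st with up := up', cnt := st.cnt + (r.2 - x) } r.2
  else
    let r := bFind (st.occ.length + 1) st.occ st.down (st.down.getD x 0)
    let down' := (r.1.foldl (fun d v => d.insert v r.2) st.down).insert x r.2
    bOccupy { st with down := down', cnt := st.cnt + (x - r.2) } r.2

def solution_alt (A : List Int) : Int :=
  (A.foldl solStepB { occ := PySem.Set.empty, down := PySem.Dict.empty,
                      up := PySem.Dict.empty, cnt := 0, mn := none }).cnt

-- ===== PRECONDITION & SPEC =====
def Spec_solution (A : List Int) (out : Int) : Prop := out = solution_alt A
instance (A : List Int) (out : Int) : Decidable (Spec_solution A out) := by unfold Spec_solution; infer_instance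

-- ===== CLAIM (what is proved, stated in full; the proofs are below) =====
def Claim_equal_solution : Prop := ∀ (A : List Int), Dom_solution A → Spec_solution A (solution A)

-- ===== LEMMAS AND PROOFS =====

-- invariants of B's state, relative to the set `occ` of occupied slots
def DownInv (occ : List Int) (dn : PySem.Dict Int Int) : Prop :=
  ∀ v ∈ occ, ∃ d, dn.get? v = some d ∧ d < v ∧ ∀ w, d < w → w < v → w ∈ occ

def UpInv (occ : List Int) (up : PySem.Dict Int Int) : Prop :=
  ∀ v ∈ occ, ∃ u, up.get? v = some u ∧ v < u ∧ ∀ w, v < w → w < u → w ∈ occ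

def MnInv (occ : List Int) (mn : Option Int) : Prop :=
  match mn with
  | none => occ = []
  | some m => m ∈ occ ∧ ∀ v ∈ occ, m ≤ v

def StInv (dic : PySem.Dict Int Int) (st : BSt) : Prop :=
  (∀ v : Int, v ∈ dic.keys ↔ v ∈ st.occ) ∧ dic.keys.Nodup ∧ st.occ.Nodup ∧
  DownInv st.occ st.down ∧ UpInv st.occ st.up ∧ MnInv st.occ st.mn

def StRel (p : PySem.Dict Int Int × Int) (st : BSt) : Prop := StInv p.1 st ∧ p.2 = st.cnt

-- counting helpers
theorem countP_shift_up (l : List Int) (x : Int) :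
    l.countP (fun v => decide (x < v)) =
      l.countP (fun v => decide (x + 1 < v)) + l.count (x + 1) := by
  induction l with
  | nil => simp
  | cons a t ih =>
    simp only [List.countP_cons, List.count_cons, ih]
    by_cases h1 : x < a <;> by_cases h2 : x + 1 < a <;> by_cases h3 : a = x + 1 <;>
      simp [h1, h2, h3] <;> omega

theorem countP_shift_down (l : List Int) (x : Int) :
    l.countP (fun v => decide (v < x)) =
      l.countP (fun v => decide (v < x - 1)) + l.count (x - 1) := by
  induction l with
  | nil => simp
  | cons a t ih =>
    simp only [List.countP_cons, List.count_cons, ih]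
    by_cases h1 : a < x <;> by_cases h2 : a < x - 1 <;> by_cases h3 : a = x - 1 <;>
      simp [h1, h2, h3] <;> omega

theorem countP_le_strict (occ : List Int) {d y : Int} (h : d < y) (hy : y ∈ occ) :
    occ.countP (fun v => decide (v ≤ d)) < occ.countP (fun v => decide (v ≤ y)) := by
  induction occ with
  | nil => simp at hy
  | cons a t ih =>
    simp only [List.countP_cons]
    rcases List.mem_cons.1 hy with h1 | h1
    · subst h1
      have hle : t.countP (fun v => decide (v ≤ d)) ≤ t.countP (fun v => decide (v ≤ y)) :=
        List.countP_mono_left (fun v _ hv => by simp at hv ⊢; omega)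
      have hnd : ¬ (y ≤ d) := by omega
      simp [hnd]
      omega
    · have := ih h1
      by_cases h2 : a ≤ d <;> by_cases h3 : a ≤ y <;> simp [h2, h3] <;> omega

theorem countP_ge_strict (occ : List Int) {d y : Int} (h : y < d) (hy : y ∈ occ) :
    occ.countP (fun v => decide (d ≤ v)) < occ.countP (fun v => decide (y ≤ v)) := by
  induction occ with
  | nil => simp at hy
  | cons a t ih =>
    simp only [List.countP_cons]
    rcases List.mem_cons.1 hy with h1 | h1
    · subst h1
      have hle : t.countP (fun v => decide (d ≤ v)) ≤ t.countP (fun v => decide (y ≤ v)) :=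
        List.countP_mono_left (fun v _ hv => by simp at hv ⊢; omega)
      have hnd : ¬ (d ≤ y) := by omega
      simp [hnd]
      omega
    · have := ih h1
      by_cases h2 : d ≤ a <;> by_cases h3 : y ≤ a <;> simp [h2, h3] <;> omega

-- existence of a free slot within `occ.length + 1` steps, above and below
theorem exists_free_above (occ : List Int) (x : Int) :
    ∃ y, x < y ∧ y ≤ x + occ.length + 1 ∧ y ∉ occ ∧ ∀ w, x < w → w < y → w ∈ occ := by
  suffices key : ∀ (n : Nat) (x : Int), occ.countP (fun v => decide (x < v)) ≤ n →
      ∃ y, x < y ∧ y ≤ x + n + 1 ∧ y ∉ occ ∧ ∀ w, x < w → w < y → w ∈ occ by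
    rcases key occ.length x (List.countP_le_length) with ⟨y, h1, h2, h3, h4⟩
    exact ⟨y, h1, by omega, h3, h4⟩
  intro n
  induction n with
  | zero =>
    intro x h
    refine ⟨x + 1, by omega, by omega, ?_, by intro w h1 h2; omega⟩
    intro hmem
    have : 0 < occ.countP (fun v => decide (x < v)) :=
      List.countP_pos_iff.2 ⟨x + 1, hmem, by simp only [decide_eq_true_eq]; omega⟩
    omega
  | succ n ih =>
    intro x h
    by_cases hx : (x + 1) ∈ occ
    · have hc : occ.countP (fun v => decide (x + 1 < v)) ≤ n := by
        have h1 := countP_shift_up occ x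
        have hcnt : 0 < occ.count (x + 1) := List.count_pos_iff.2 hx
        omega
      rcases ih (x + 1) hc with ⟨y, h1, h2, h3, h4⟩
      refine ⟨y, by omega, by omega, h3, ?_⟩
      intro w hw1 hw2
      rcases eq_or_lt_of_le (by omega : x + 1 ≤ w) with he | hl
      · rwa [← he]
      · exact h4 w hl hw2
    · exact ⟨x + 1, by omega, by omega, hx, by intro w h1 h2; omega⟩

theorem exists_free_below (occ : List Int) (x : Int) :
    ∃ y, y < x ∧ x - occ.length - 1 ≤ y ∧ y ∉ occ ∧ ∀ w, y < w → w < x → w ∈ occ := by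
  suffices key : ∀ (n : Nat) (x : Int), occ.countP (fun v => decide (v < x)) ≤ n →
      ∃ y, y < x ∧ x - n - 1 ≤ y ∧ y ∉ occ ∧ ∀ w, y < w → w < x → w ∈ occ by
    rcases key occ.length x (List.countP_le_length) with ⟨y, h1, h2, h3, h4⟩
    exact ⟨y, h1, by omega, h3, h4⟩
  intro n
  induction n with
  | zero =>
    intro x h
    refine ⟨x - 1, by omega, by omega, ?_, by intro w h1 h2; omega⟩
    intro hmem
    have : 0 < occ.countP (fun v => decide (v < x)) :=
      List.countP_pos_iff.2 ⟨x - 1, hmem, by simp only [decide_eq_true_eq]; omega⟩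
    omega
  | succ n ih =>
    intro x h
    by_cases hx : (x - 1) ∈ occ
    · have hc : occ.countP (fun v => decide (v < x - 1)) ≤ n := by
        have h1 := countP_shift_down occ x
        have hcnt : 0 < occ.count (x - 1) := List.count_pos_iff.2 hx
        omega
      rcases ih (x - 1) hc with ⟨y, h1, h2, h3, h4⟩
      refine ⟨y, by omega, by omega, h3, ?_⟩
      intro w hw1 hw2
      rcases eq_or_lt_of_le (by omega : w ≤ x - 1) with he | hl
      · rwa [he]
      · exact h4 w hw1 hl
    · exact ⟨x - 1, by omega, by omega, hx, by intro w h1 h2; omega⟩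

-- the characterizations of A's two walk loops
theorem solUp_eq (fuel : Nat) : ∀ (dic : PySem.Dict Int Int) (x cnt y : Int),
    x < y → y ≤ x + fuel → dic.contains y = false →
    (∀ w, x < w → w < y → dic.contains w = true) →
    solUp fuel dic x cnt = (dic.insert y 1, cnt + (y - x)) := by
  induction fuel with
  | zero => intro dic x cnt y h1 h2 _ _; omega
  | succ n ih =>
    intro dic x cnt y h1 h2 hy hint
    by_cases hx : dic.contains (x + 1) = true
    · have hne : x + 1 < y := by
        rcases eq_or_lt_of_le (by omega : x + 1 ≤ y) with he | hl
        · rw [← he] at hy; rw [hx] at hy; exact absurd hy (by simp)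
        · exact hl
      rw [solUp, if_pos hx, ih dic (x + 1) (cnt + 1) y hne (by omega) hy
        (fun w hw1 hw2 => hint w (by omega) hw2)]
      have : cnt + 1 + (y - (x + 1)) = cnt + (y - x) := by ring
      rw [this]
    · have hy1 : y = x + 1 := by
        rcases eq_or_lt_of_le (by omega : x + 1 ≤ y) with he | hl
        · omega
        · exact absurd (hint (x + 1) (by omega) hl) (by simpa using hx)
      rw [solUp, if_neg hx, hy1]
      have : cnt + 1 = cnt + (x + 1 - x) := by ring
      rw [this]

theorem solDown_eq (fuel : Nat) : ∀ (dic : PySem.Dict Int Int) (x cnt y : Int),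
    y < x → x - fuel ≤ y → dic.contains y = false →
    (∀ w, y < w → w < x → dic.contains w = true) →
    solDown fuel dic x cnt = (dic.insert y 1, cnt + (x - y)) := by
  induction fuel with
  | zero => intro dic x cnt y h1 h2 _ _; omega
  | succ n ih =>
    intro dic x cnt y h1 h2 hy hint
    by_cases hx : dic.contains (x - 1) = true
    · have hne : y < x - 1 := by
        rcases eq_or_lt_of_le (by omega : y ≤ x - 1) with he | hl
        · rw [he] at hy; rw [hx] at hy; exact absurd hy (by simp)
        · exact hl
      rw [solDown, if_pos hx, ih dic (x - 1) (cnt + 1) y hne (by omega) hy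
        (fun w hw1 hw2 => hint w hw1 (by omega))]
      have : cnt + 1 + (x - 1 - y) = cnt + (x - y) := by ring
      rw [this]
    · have hy1 : y = x - 1 := by
        rcases eq_or_lt_of_le (by omega : y ≤ x - 1) with he | hl
        · omega
        · exact absurd (hint (x - 1) hl (by omega)) (by simpa using hx)
      rw [solDown, if_neg hx, hy1]
      have : cnt + 1 = cnt + (x - (x - 1)) := by ring
      rw [this]

-- the characterizations of B's pointer-chasing loop
theorem bFind_down (fuel : Nat) : ∀ (occ : List Int) (dn : PySem.Dict Int Int) (y : Int),
    DownInv occ dn → occ.countP (fun v => decide (v ≤ y)) < fuel →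
    (bFind fuel occ dn y).2 ≤ y ∧ (bFind fuel occ dn y).2 ∉ occ ∧
      (∀ w, (bFind fuel occ dn y).2 < w → w ≤ y → w ∈ occ) ∧
      (∀ v ∈ (bFind fuel occ dn y).1, (bFind fuel occ dn y).2 < v ∧ v ≤ y) := by
  induction fuel with
  | zero => intro occ dn y _ h; exact absurd h (by omega)
  | succ n ih =>
    intro occ dn y hInv hcnt
    by_cases hy : y ∈ occ
    · rcases hInv y hy with ⟨d, hget, hdy, hintv⟩
      have hgd : dn.getD y 0 = d := by
        rw [PySem.Dict.getD_eq_get?_getD, hget]; rfl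
      have hcont : PySem.Set.contains occ y = true := (PySem.Set.contains_iff occ y).2 hy
      obtain ⟨hz1, hz2, hz3, hz4⟩ := ih occ dn d hInv (by
        have := countP_le_strict occ hdy hy
        omega)
      simp only [bFind, hcont, if_true, hgd]
      refine ⟨by omega, hz2, ?_, ?_⟩
      · intro w hw1 hw2
        rcases lt_trichotomy w d with hc | hc | hc
        · exact hz3 w hw1 (by omega)
        · subst hc; exact hz3 w hw1 le_rfl
        · rcases eq_or_lt_of_le hw2 with he | hl
          · rwa [he]
          · exact hintv w hc hl
      · intro v hv
        rcases List.mem_cons.1 hv with he | hm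
        · subst he; exact ⟨by omega, le_rfl⟩
        · obtain ⟨a1, a2⟩ := hz4 v hm
          exact ⟨a1, by omega⟩
    · have hcont : ¬ (PySem.Set.contains occ y = true) := fun h => hy ((PySem.Set.contains_iff occ y).1 h)
      simp only [bFind, if_neg hcont]
      exact ⟨le_rfl, hy, by intro w h1 h2; omega, by simp⟩

theorem bFind_up (fuel : Nat) : ∀ (occ : List Int) (up : PySem.Dict Int Int) (y : Int),
    UpInv occ up → occ.countP (fun v => decide (y ≤ v)) < fuel →
    y ≤ (bFind fuel occ up y).2 ∧ (bFind fuel occ up y).2 ∉ occ ∧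
      (∀ w, y ≤ w → w < (bFind fuel occ up y).2 → w ∈ occ) ∧
      (∀ v ∈ (bFind fuel occ up y).1, v < (bFind fuel occ up y).2 ∧ y ≤ v) := by
  induction fuel with
  | zero => intro occ up y _ h; exact absurd h (by omega)
  | succ n ih =>
    intro occ up y hInv hcnt
    by_cases hy : y ∈ occ
    · rcases hInv y hy with ⟨u, hget, huy, hintv⟩
      have hgd : up.getD y 0 = u := by
        rw [PySem.Dict.getD_eq_get?_getD, hget]; rfl
      have hcont : PySem.Set.contains occ y = true := (PySem.Set.contains_iff occ y).2 hy
      obtain ⟨hz1, hz2, hz3, hz4⟩ := ih occ up u hInv (by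
        have := countP_ge_strict occ huy hy
        omega)
      simp only [bFind, hcont, if_true, hgd]
      refine ⟨by omega, hz2, ?_, ?_⟩
      · intro w hw1 hw2
        rcases lt_trichotomy w u with hc | hc | hc
        · rcases eq_or_lt_of_le hw1 with he | hl
          · rwa [← he]
          · exact hintv w hl hc
        · subst hc; exact hz3 w le_rfl hw2
        · exact hz3 w (by omega) hw2
      · intro v hv
        rcases List.mem_cons.1 hv with he | hm
        · subst he; exact ⟨by omega, le_rfl⟩
        · obtain ⟨a1, a2⟩ := hz4 v hm
          exact ⟨a1, by omega⟩
    · have hcont : ¬ (PySem.Set.contains occ y = true) := fun h => hy ((PySem.Set.contains_iff occ y).1 h)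
      simp only [bFind, if_neg hcont]
      exact ⟨le_rfl, hy, by intro w h1 h2; omega, by simp⟩

-- path compression: a fold of constant-value inserts
theorem get?_foldl_insert_const (p : List Int) (d : PySem.Dict Int Int) (z v : Int) :
    (p.foldl (fun d w => d.insert w z) d).get? v =
      if v ∈ p then some z else d.get? v := by
  induction p generalizing d with
  | nil => simp
  | cons a t ih =>
    simp only [List.foldl_cons]
    rw [ih]
    by_cases hv : v ∈ t
    · simp [hv]
    · rw [if_neg hv, PySem.Dict.get?_insert]
      by_cases he : v = a
      · simp [he]
      · simp [he, hv]

-- pyMinKeys returns the minimum of the key set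
theorem pyMinKeys_spec (dic : PySem.Dict Int Int) (h : dic.keys ≠ []) :
    pyMinKeys dic ∈ dic.keys ∧ ∀ v ∈ dic.keys, pyMinKeys dic ≤ v := by
  unfold pyMinKeys
  cases hm : PySem.List.min? dic.keys (fun y => y) with
  | none => exact absurd ((PySem.List.min?_eq_none_iff _ _).1 hm) h
  | some m =>
    simp only [Option.getD_some]
    exact ⟨PySem.List.min?_mem hm, fun v hv => PySem.List.min?_isMin hm v hv⟩

-- occupying a fresh slot preserves the whole StInv invariant
theorem StInv_occupy (dic : PySem.Dict Int Int) (st : BSt) (y : Int)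
    (hInv : StInv dic st) (hfree : y ∉ st.occ) :
    StInv (dic.insert y 1) (bOccupy st y) := by
  obtain ⟨hcorr, hnodk, hnodo, hdn, hup, hmn⟩ := hInv
  refine ⟨?_, ?_, ?_, ?_, ?_, ?_⟩
  · intro v
    rw [PySem.Dict.mem_keys_insert]
    simp only [bOccupy]
    rw [PySem.Set.mem_add]
    have := hcorr v
    tauto
  · exact PySem.Dict.nodup_keys_insert _ _ _ hnodk
  · simp only [bOccupy]
    exact PySem.Set.nodup_add _ _ hnodo
  · intro v hv
    simp only [bOccupy] at hv ⊢
    rw [PySem.Set.mem_add] at hv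
    rcases hv with hv | hv
    · obtain ⟨d, hd1, hd2, hd3⟩ := hdn v hv
      have hne : ¬ v = y := fun he => hfree (he ▸ hv)
      refine ⟨d, ?_, hd2, fun w h1 h2 => (PySem.Set.mem_add _ _ _).2 (Or.inl (hd3 w h1 h2))⟩
      rw [PySem.Dict.get?_insert, if_neg hne]
      exact hd1
    · subst hv
      exact ⟨v - 1, PySem.Dict.get?_insert_self _ _ _, by omega,
        fun w h1 h2 => absurd h1 (by omega)⟩
  · intro v hv
    simp only [bOccupy] at hv ⊢
    rw [PySem.Set.mem_add] at hv
    rcases hv with hv | hv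
    · obtain ⟨u, hu1, hu2, hu3⟩ := hup v hv
      have hne : ¬ v = y := fun he => hfree (he ▸ hv)
      refine ⟨u, ?_, hu2, fun w h1 h2 => (PySem.Set.mem_add _ _ _).2 (Or.inl (hu3 w h1 h2))⟩
      rw [PySem.Dict.get?_insert, if_neg hne]
      exact hu1
    · subst hv
      exact ⟨v + 1, PySem.Dict.get?_insert_self _ _ _, by omega,
        fun w h1 h2 => absurd h1 (by omega)⟩
  · simp only [bOccupy]
    cases hc : st.mn with
    | none =>
      rw [hc] at hmn
      simp only [MnInv] at hmn ⊢
      constructor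
      · exact (PySem.Set.mem_add _ _ _).2 (Or.inr rfl)
      · intro v hv
        rcases (PySem.Set.mem_add _ _ _).1 hv with hv | hv
        · rw [hmn] at hv; simp at hv
        · omega
    | some m =>
      rw [hc] at hmn
      simp only [MnInv] at hmn ⊢
      obtain ⟨hm1, hm2⟩ := hmn
      by_cases hlt : y < m
      · simp only [if_pos hlt]
        refine ⟨(PySem.Set.mem_add _ _ _).2 (Or.inr rfl), ?_⟩
        intro v hv
        rcases (PySem.Set.mem_add _ _ _).1 hv with hv | hv
        · have := hm2 v hv; omega
        · omega
      · simp only [if_neg hlt]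
        refine ⟨(PySem.Set.mem_add _ _ _).2 (Or.inl hm1), ?_⟩
        intro v hv
        rcases (PySem.Set.mem_add _ _ _).1 hv with hv | hv
        · exact hm2 v hv
        · omega

-- one step preserves the relation
theorem step_rel (p : PySem.Dict Int Int × Int) (st : BSt) (x : Int)
    (h : StRel p st) : StRel (solStepA p x) (solStepB st x) := by
  obtain ⟨hInv, hcnt⟩ := h
  obtain ⟨hcorr, hnodk, hnodo, hdn, hup, hmn⟩ := hInv
  have hsz : p.1.keys.length = p.1.size := by
    simp only [PySem.Dict.keys, PySem.Dict.size, List.length_map]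
  by_cases hx : x ∈ st.occ
  · -- collision
    have hA : p.1.contains x = true := by
      rw [PySem.Dict.contains_iff_mem_keys]
      exact (hcorr x).2 hx
    have hAne : ¬ (p.1.contains x = false) := by simp [hA]
    have hBne : ¬ (PySem.Set.contains st.occ x = false) := by simp [hx]
    have hkeysne : p.1.keys ≠ [] := by
      intro hk
      have hxk := (hcorr x).2 hx
      rw [hk] at hxk
      simp at hxk
    obtain ⟨hmmem, hmmin⟩ := pyMinKeys_spec p.1 hkeysne
    have hmocc : pyMinKeys p.1 ∈ st.occ := (hcorr _).1 hmmem
    obtain ⟨m', hmn'⟩ : ∃ m', st.mn = some m' := by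
      cases hmne : st.mn with
      | none =>
        rw [hmne] at hmn
        simp only [MnInv] at hmn
        rw [hmn] at hx
        simp at hx
      | some mm => exact ⟨mm, rfl⟩
    rw [hmn'] at hmn
    simp only [MnInv] at hmn
    obtain ⟨hm'occ, hm'min⟩ := hmn
    have hmm' : pyMinKeys p.1 = m' :=
      le_antisymm (hmmin m' ((hcorr m').2 hm'occ)) (hm'min _ hmocc)
    have hmx : pyMinKeys p.1 ≤ x := hmmin x ((hcorr x).2 hx)
    by_cases hcase : pyMinKeys p.1 ≥ x
    · -- A walks up; x is the minimum
      have hBcond : st.mn = some x := by rw [hmn']; congr 1; omega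
      obtain ⟨u, hu1, hu2, hu3⟩ := hup x hx
      have hgd : st.up.getD x 0 = u := by
        rw [PySem.Dict.getD_eq_get?_getD, hu1]; rfl
      obtain ⟨hz1, hz2, hz3, hz4⟩ := bFind_up (st.occ.length + 1) st.occ st.up u hup
        (by have := List.countP_le_length (p := fun v => decide (u ≤ v)) (l := st.occ); omega)
    -- abbreviations
      generalize hzz : (bFind (st.occ.length + 1) st.occ st.up u) = r at *
      obtain ⟨pa, z⟩ := r
      simp only at hz1 hz2 hz3 hz4
      have hxz : x < z := by omega
      have hintz : ∀ w, x < w → w < z → w ∈ st.occ := by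
        intro w h1 h2
        by_cases hc : w < u
        · exact hu3 w h1 hc
        · exact hz3 w (by omega) h2
      have hzkeys : z ∉ p.1.keys := fun hk => hz2 ((hcorr z).1 hk)
      have hAcontz : p.1.contains z = false := by
        cases hcz : p.1.contains z
        · rfl
        · exact absurd ((PySem.Dict.contains_iff_mem_keys _ _).1 hcz) hzkeys
      have hAint : ∀ w, x < w → w < z → p.1.contains w = true := by
        intro w h1 h2
        rw [PySem.Dict.contains_iff_mem_keys]
        exact (hcorr w).2 (hintz w h1 h2)
      obtain ⟨y, hy1, hy2, hy3, hy4⟩ := exists_free_above p.1.keys x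
      have hyz : y = z := by
        rcases lt_trichotomy y z with hc | hc | hc
        · exact absurd ((hcorr y).2 (hintz y hy1 hc)) hy3
        · exact hc
        · exact absurd (hy4 z hxz hc) hzkeys
      have hAeq : solStepA p x = (p.1.insert z 1, p.2 + (z - x)) := by
        unfold solStepA
        rw [if_neg hAne, if_pos hcase]
        exact solUp_eq (p.1.size + 1) p.1 x p.2 z hxz (by rw [hyz] at hy2; omega)
          hAcontz hAint
      have hBeq : solStepB st x =
          bOccupy { st with up := (pa.foldl (fun d v => d.insert v z) st.up).insert x z,
                            cnt := st.cnt + (z - x) } z := by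
        unfold solStepB
        rw [if_neg hBne, if_pos hBcond, hgd, hzz]
      rw [hAeq, hBeq]
      constructor
      · apply StInv_occupy
        · refine ⟨hcorr, hnodk, hnodo, hdn, ?_, ?_⟩
          · intro v hv
            by_cases hvx : v = x
            · subst hvx
              exact ⟨z, PySem.Dict.get?_insert_self _ _ _, hxz, hintz⟩
            · have hlook : ((pa.foldl (fun d w => d.insert w z) st.up).insert x z).get? v =
                  if v ∈ pa then some z else st.up.get? v := by
                rw [PySem.Dict.get?_insert, if_neg hvx, get?_foldl_insert_const]
              by_cases hvp : v ∈ pa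
              · obtain ⟨hv1, hv2⟩ := hz4 v hvp
                refine ⟨z, by rw [hlook, if_pos hvp], hv1, ?_⟩
                intro w hw1 hw2
                exact hz3 w (by omega) hw2
              · obtain ⟨u', hu'1, hu'2, hu'3⟩ := hup v hv
                exact ⟨u', by rw [hlook, if_neg hvp]; exact hu'1, hu'2, hu'3⟩
          · rw [hmn']
            simp only [MnInv]
            exact ⟨hm'occ, hm'min⟩
        · exact hz2
      · simp only [bOccupy]
        omega
    · -- A walks down
      have hcase2 : pyMinKeys p.1 < x := by omega
      have hBcond : ¬ (st.mn = some x) := by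
        rw [hmn']
        intro hcon
        simp only [Option.some.injEq] at hcon
        omega
      obtain ⟨d0, hd1, hd2, hd3⟩ := hdn x hx
      have hgd : st.down.getD x 0 = d0 := by
        rw [PySem.Dict.getD_eq_get?_getD, hd1]; rfl
      obtain ⟨hz1, hz2, hz3, hz4⟩ := bFind_down (st.occ.length + 1) st.occ st.down d0 hdn
        (by have := List.countP_le_length (p := fun v => decide (v ≤ d0)) (l := st.occ); omega)
      generalize hzz : (bFind (st.occ.length + 1) st.occ st.down d0) = r at *
      obtain ⟨pa, z⟩ := r
      simp only at hz1 hz2 hz3 hz4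
      have hxz : z < x := by omega
      have hintz : ∀ w, z < w → w < x → w ∈ st.occ := by
        intro w h1 h2
        by_cases hc : w ≤ d0
        · exact hz3 w h1 hc
        · exact hd3 w (by omega) h2
      have hzkeys : z ∉ p.1.keys := fun hk => hz2 ((hcorr z).1 hk)
      have hAcontz : p.1.contains z = false := by
        cases hcz : p.1.contains z
        · rfl
        · exact absurd ((PySem.Dict.contains_iff_mem_keys _ _).1 hcz) hzkeys
      have hAint : ∀ w, z < w → w < x → p.1.contains w = true := by
        intro w h1 h2
        rw [PySem.Dict.contains_iff_mem_keys]
        exact (hcorr w).2 (hintz w h1 h2)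
      obtain ⟨y, hy1, hy2, hy3, hy4⟩ := exists_free_below p.1.keys x
      have hyz : y = z := by
        rcases lt_trichotomy y z with hc | hc | hc
        · exact absurd (hy4 z hc hxz) hzkeys
        · exact hc
        · exact absurd ((hcorr y).2 (hintz y hc hy1)) hy3
      have hAeq : solStepA p x = (p.1.insert z 1, p.2 + (x - z)) := by
        unfold solStepA
        rw [if_neg hAne, if_neg hcase, if_pos hcase2]
        exact solDown_eq (p.1.size + 1) p.1 x p.2 z hxz (by rw [hyz] at hy2; omega)
          hAcontz hAint
      have hBeq : solStepB st x =
          bOccupy { st with down := (pa.foldl (fun d v => d.insert v z) st.down).insert x z,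
                            cnt := st.cnt + (x - z) } z := by
        unfold solStepB
        rw [if_neg hBne, if_neg hBcond, hgd, hzz]
      rw [hAeq, hBeq]
      constructor
      · apply StInv_occupy
        · refine ⟨hcorr, hnodk, hnodo, ?_, hup, ?_⟩
          · intro v hv
            by_cases hvx : v = x
            · subst hvx
              exact ⟨z, PySem.Dict.get?_insert_self _ _ _, hxz, hintz⟩
            · have hlook : ((pa.foldl (fun d w => d.insert w z) st.down).insert x z).get? v =
                  if v ∈ pa then some z else st.down.get? v := by
                rw [PySem.Dict.get?_insert, if_neg hvx, get?_foldl_insert_const]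
              by_cases hvp : v ∈ pa
              · obtain ⟨hv1, hv2⟩ := hz4 v hvp
                refine ⟨z, by rw [hlook, if_pos hvp], hv1, ?_⟩
                intro w hw1 hw2
                exact hz3 w hw1 (by omega)
              · obtain ⟨d', hd'1, hd'2, hd'3⟩ := hdn v hv
                exact ⟨d', by rw [hlook, if_neg hvp]; exact hd'1, hd'2, hd'3⟩
          · rw [hmn']
            simp only [MnInv]
            exact ⟨hm'occ, hm'min⟩
        · exact hz2
      · simp only [bOccupy]
        omega
  · -- fresh value
    have hAfalse : p.1.contains x = false := by
      cases hc : p.1.contains x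
      · rfl
      · exact absurd ((hcorr x).1 ((PySem.Dict.contains_iff_mem_keys _ _).1 hc)) hx
    have hBfalse : PySem.Set.contains st.occ x = false := by
      cases hc : PySem.Set.contains st.occ x
      · rfl
      · exact absurd ((PySem.Set.contains_iff st.occ x).1 hc) hx
    unfold solStepA solStepB
    rw [if_pos hAfalse, if_pos hBfalse]
    exact ⟨StInv_occupy p.1 st x ⟨hcorr, hnodk, hnodo, hdn, hup, hmn⟩ hx,
      by simp only [bOccupy]; exact hcnt⟩

theorem foldl_StRel (A : List Int) : ∀ (p : PySem.Dict Int Int × Int) (st : BSt),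
    StRel p st → StRel (A.foldl solStepA p) (A.foldl solStepB st) := by
  intro p st h
  induction A generalizing p st with
  | nil => exact h
  | cons a t ih => exact ih _ _ (step_rel p st a h)

-- ===== VERDICT (by name: the statement is the Claim_ definition above) =====
theorem solution_spec : Claim_equal_solution := by
  intro A _
  unfold Spec_solution solution solution_alt
  exact (foldl_StRel A (PySem.Dict.empty, 0)
    { occ := PySem.Set.empty, down := PySem.Dict.empty,
      up := PySem.Dict.empty, cnt := 0, mn := none }
    ⟨⟨by simp [PySem.Dict.keys_empty, PySem.Set.empty],
      by simp, by simp [PySem.Set.empty],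
      by intro v hv; simp [PySem.Set.empty] at hv,
      by intro v hv; simp [PySem.Set.empty] at hv,
      by simp [MnInv, PySem.Set.empty]⟩, rfl⟩).2
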